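-- pv_equiv track=rewrite | github.com/tkuriyama/sudoku | solver/solver_logging.py | boxs
-- ===== SOURCE A (Python) =====
-- def group(items, n):
--     """Group sequence into n-tuples."""
--     return list(zip(*[items[i::n] for i in range(n)]))
--
-- def flatten(nested):
--     """Flatten nested sequence of sequences."""
--     return list(n for sublist in nested for n in sublist)
--
-- def boxs(board):
--     """Group board by its boxes.
--     For each triple of rows, group each row into 3 digits and
--     zip up the rows; the resulting lists are the board boxes.
--     """
--     boxes = []
--     for grouped in group(board, 3):
--         triple = [group(row, 3) for row in grouped]
--         zipped = list(zip(*triple))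
--         rows = [flatten(row) for row in zipped]
--         boxes.extend(rows)
--     return boxes
-- ===== SOURCE B (Python) =====
-- def boxs(board):
--     """Group board by its boxes: consume rows in triples with the standard
--     iterator-grouper idiom, then walk the three rows in lockstep, three
--     cells at a time."""
--     def triples(xs):
--         it = iter(xs)
--         return zip(it, it, it)
--
--     boxes = []
--     for r0, r1, r2 in triples(board):
--         for t0, t1, t2 in zip(triples(r0), triples(r1), triples(r2)):
--             boxes.append([*t0, *t1, *t2])
--     return boxes
-- ===== Notes on version B (the rewrite author's own statement) =====
-- stated objective: simpler
-- what changed: boxs is rewritten with the standard iterator-grouper idiom (zip of one iterator three times): rows are consumed in triples and the three rows' cell-triples are zipped in lockstep, eliminating the strided-slice/zip-transpose/flatten helper pipeline. (fewer intermediate list allocations give a constant-factor speedup)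
import Mathlib
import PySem

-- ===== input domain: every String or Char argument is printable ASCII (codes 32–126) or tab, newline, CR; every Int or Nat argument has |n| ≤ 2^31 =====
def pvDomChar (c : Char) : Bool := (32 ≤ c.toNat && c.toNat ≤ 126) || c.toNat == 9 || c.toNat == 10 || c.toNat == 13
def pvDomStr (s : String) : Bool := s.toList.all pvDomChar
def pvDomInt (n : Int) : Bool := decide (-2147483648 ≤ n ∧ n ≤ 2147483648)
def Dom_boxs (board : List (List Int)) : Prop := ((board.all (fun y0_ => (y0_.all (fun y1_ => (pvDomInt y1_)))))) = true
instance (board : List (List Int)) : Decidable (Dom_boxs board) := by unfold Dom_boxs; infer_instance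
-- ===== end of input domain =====

-- B replaces A's strided-slice/zip-transpose/flatten pipeline by the standard
-- iterator-grouper idiom, consuming rows and row cells directly in triples; objective: simpler.

-- ===== PORT A =====

-- Python's zip(*ls): truncating transpose; stops as soon as any list is exhausted
-- (ls.mapM List.head? = none exactly when some list is empty).
def pyZip {α : Type} (ls : List (List α)) : List (List α) :=
  match h : ls.mapM List.head? with
  | none => []
  | some hs =>
    match ls, h with
    | [], _ => []
    | x :: rest, h =>
      hs :: pyZip (x.tail :: rest.map List.tail)
termination_by (ls.headD []).length
decreasing_by
  simp only [List.headD_cons]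
  have hx : x ≠ [] := by
    intro hnil; subst hnil
    simp [List.mapM_cons] at h
  cases x with
  | nil => exact absurd rfl hx
  | cons a t => simp

-- group(items, n) = list(zip(*[items[i::n] for i in range(n)]))
-- (slice? is none only for step 0; group is only ever called with n = 3, so .getD [] is never taken)
def pyGroup {α : Type} (items : List α) (n : Int) : List (List α) :=
  pyZip ((PySem.List.pyRange 0 n 1).map (fun i => (PySem.List.slice? items (some i) none n).getD []))

-- flatten(nested) = list(n for sublist in nested for n in sublist)
def pyFlatten {α : Type} (nested : List (List α)) : List α :=
  nested.flatMap (fun sublist => sublist)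

def boxs (board : List (List Int)) : List (List Int) :=
  (pyGroup board 3).foldl (fun boxes grouped =>
    let triple := grouped.map (fun row => pyGroup row 3)
    let zipped := pyZip triple
    let rows := zipped.map (fun row => pyFlatten row)
    boxes ++ rows) []

-- ===== PORT B =====

-- triples(xs) = zip(it, it, it) on one iterator: consume xs three at a time
def triples {α : Type} : List α → List (α × α × α)
  | a :: b :: c :: t => (a, b, c) :: triples t
  | _ => []

-- Source B: for each triple of rows, zip their cell-triples in lockstep and append [*t0,*t1,*t2]
def boxs_alt (board : List (List Int)) : List (List Int) :=
  (triples board).foldl (fun boxes r =>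
    (List.zipWith3 (fun (t0 t1 t2 : Int × Int × Int) =>
        [t0.1, t0.2.1, t0.2.2, t1.1, t1.2.1, t1.2.2, t2.1, t2.2.1, t2.2.2])
      (triples r.1) (triples r.2.1) (triples r.2.2)).foldl
      (fun bx box => bx ++ [box]) boxes) []

-- ===== PRECONDITION & SPEC =====
def Spec_boxs (board : List (List Int)) (out : List (List Int)) : Prop := out = boxs_alt board
instance (board : List (List Int)) (out : List (List Int)) : Decidable (Spec_boxs board out) := by unfold Spec_boxs; infer_instance

-- ===== CLAIM (what is proved, stated in full; the proofs are below) =====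
def Claim_equal_boxs : Prop := ∀ (board : List (List Int)), Dom_boxs board → Spec_boxs board (boxs board)

-- ===== LEMMAS AND PROOFS =====

-- canonical reference forms both ports are reduced to
def everyThird {α : Type} : List α → List α
  | [] => []
  | a :: t => a :: everyThird (t.drop 2)
termination_by l => l.length
decreasing_by simp

def chunk3 {α : Type} : List α → List (List α)
  | a :: b :: c :: t => [a, b, c] :: chunk3 t
  | _ => []

def inner3 {α : Type} : List α → List α → List α → List (List α)
  | a0 :: b0 :: c0 :: t0, a1 :: b1 :: c1 :: t1, a2 :: b2 :: c2 :: t2 =>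
      [a0, b0, c0, a1, b1, c1, a2, b2, c2] :: inner3 t0 t1 t2
  | _, _, _ => []

def boxsSpec : List (List Int) → List (List Int)
  | r0 :: r1 :: r2 :: t => inner3 r0 r1 r2 ++ boxsSpec t
  | _ => []

-- --- A-side reduction ---

theorem mapM_head?_eq_none {α : Type} (ls : List (List α)) (h : [] ∈ ls) :
    ls.mapM List.head? = none := by
  induction ls with
  | nil => simp at h
  | cons x rest ih =>
    rcases List.mem_cons.mp h with rfl | hm
    · simp [List.mapM_cons]
    · cases hx : x.head? <;> simp [List.mapM_cons, hx, ih hm]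

theorem pyZip_of_mem_nil {α : Type} (ls : List (List α)) (h : [] ∈ ls) :
    pyZip ls = [] := by
  rw [pyZip]
  split
  · rfl
  · next hs heq =>
      rw [mapM_head?_eq_none ls h] at heq
      exact absurd heq (by simp)

theorem pyZip_cons3 {α : Type} (a b c : α) (A B C : List α) :
    pyZip [a :: A, b :: B, c :: C] = [a, b, c] :: pyZip [A, B, C] := by
  rw [pyZip]
  split
  · next heq => simp [List.mapM_cons] at heq
  · next hs heq =>
      simp [List.mapM_cons] at heq
      subst heq
      rfl

theorem everyThird_eq_filterMap {α : Type} (ys : List α) :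
    everyThird ys = (List.range ((ys.length + 2) / 3)).filterMap (fun k => ys[3 * k]?) := by
  fun_induction everyThird ys with
  | case1 => simp
  | case2 a t ih =>
    have hcnt : ((a :: t).length + 2) / 3 = t.length / 3 + 1 := by simp; omega
    have hcnt2 : ((t.drop 2).length + 2) / 3 = t.length / 3 := by simp; omega
    rw [ih, hcnt2, hcnt, List.range_succ_eq_map, List.filterMap_cons]
    have hf : ((a :: t)[3 * 0]?) = some a := by simp
    rw [hf, List.filterMap_map]
    have hfun : (fun k => (List.drop 2 t)[3 * k]?) = ((fun k => (a :: t)[3 * k]?) ∘ Nat.succ) := by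
      funext k
      show (t.drop 2)[3 * k]? = (a :: t)[3 * (k + 1)]?
      rw [List.getElem?_drop, show 3 * (k + 1) = (2 + 3 * k) + 1 from by omega,
          List.getElem?_cons_succ]
    rw [hfun]

theorem sliceStep3 {α : Type} (xs : List α) (i : Nat) :
    (PySem.List.slice? xs (some (i : Int)) none 3).getD [] = everyThird (xs.drop i) := by
  rw [everyThird_eq_filterMap]
  rw [PySem.List.slice?, PySem.List.sliceIndices]
  simp only [if_neg (show ¬ (3:Int) < 0 by omega), if_neg (show ¬ (3:Int) = 0 by omega),
             if_neg (show ¬ ((i:Int) < 0) by omega), if_pos (show (0:Int) < 3 by omega),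
             Option.getD_some, List.length_drop]
  rcases (show i ≤ xs.length ∨ xs.length < i from by omega) with hle | hlt
  · have hmin : min (i : Int) (xs.length : Int) = (i : Int) := by omega
    rw [hmin]
    have hcount : (if (i : Int) < (xs.length : Int) then (((xs.length : Int) - (i : Int) + 3 - 1) / 3).toNat else 0)
        = (xs.length - i + 2) / 3 := by
      split <;> omega
    rw [hcount]
    have hfun : (fun k : Nat => xs[((i : Int) + 3 * (k : Int)).toNat]?)
        = (fun k : Nat => (xs.drop i)[3 * k]?) := by
      funext k
      rw [List.getElem?_drop, show ((i : Int) + 3 * (k : Int)).toNat = i + 3 * k from by omega]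
    rw [hfun]
  · have hmin : min (i : Int) (xs.length : Int) = (xs.length : Int) := by omega
    rw [hmin, if_neg (lt_irrefl _)]
    simp [show (xs.length - i + 2) / 3 = 0 from by omega]

theorem zipE {α : Type} (xs : List α) :
    pyZip [everyThird xs, everyThird (xs.drop 1), everyThird (xs.drop 2)] = chunk3 xs := by
  fun_induction chunk3 xs with
  | case1 a b c t ih =>
    have h0 : everyThird (a :: b :: c :: t) = a :: everyThird t := by simp [everyThird]
    have h1 : everyThird ((a :: b :: c :: t).drop 1) = b :: everyThird (t.drop 1) := by
      simp [everyThird]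
    have h2 : everyThird ((a :: b :: c :: t).drop 2) = c :: everyThird (t.drop 2) := by
      simp [everyThird]
    rw [h0, h1, h2, pyZip_cons3, ih]
  | case2 xs h =>
    rcases xs with _ | ⟨a, _ | ⟨b, _ | ⟨c, t⟩⟩⟩
    · exact pyZip_of_mem_nil _ (by simp [everyThird])
    · exact pyZip_of_mem_nil _ (by simp [everyThird])
    · exact pyZip_of_mem_nil _ (by simp [everyThird])
    · exact (h a b c t rfl).elim

theorem pyGroup_eq_chunk3 {α : Type} (xs : List α) : pyGroup xs 3 = chunk3 xs := by
  have hr : PySem.List.pyRange 0 3 1 = [0, 1, 2] := by decide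
  rw [pyGroup, hr]
  have s0 := sliceStep3 xs 0
  have s1 := sliceStep3 xs 1
  have s2 := sliceStep3 xs 2
  norm_num at s0 s1 s2
  simp only [List.map_cons, List.map_nil, s0, s1, s2]
  simpa [List.drop_one] using zipE xs

theorem chunk3_short {α : Type} (l : List α) (h : l.length < 3) : chunk3 l = [] := by
  rcases l with _ | ⟨a, _ | ⟨b, _ | ⟨c, t⟩⟩⟩ <;>
    first | rfl | (exfalso; simp only [List.length_cons] at h; omega)

theorem boxsSpec_short (l : List (List Int)) (h : l.length < 3) : boxsSpec l = [] := by
  rcases l with _ | ⟨a, _ | ⟨b, _ | ⟨c, t⟩⟩⟩ <;>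
    first | rfl | (exfalso; simp only [List.length_cons] at h; omega)

theorem inner3_short {α : Type} (x y z : List α)
    (h : x.length < 3 ∨ y.length < 3 ∨ z.length < 3) : inner3 x y z = [] := by
  rcases x with _ | ⟨a0, _ | ⟨b0, _ | ⟨c0, t0⟩⟩⟩ <;>
    rcases y with _ | ⟨a1, _ | ⟨b1, _ | ⟨c1, t1⟩⟩⟩ <;>
      rcases z with _ | ⟨a2, _ | ⟨b2, _ | ⟨c2, t2⟩⟩⟩ <;>
        first
          | rfl
          | (exfalso; simp only [List.length_cons] at h; omega)

theorem A_inner (x y z : List Int) :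
    (pyZip [chunk3 x, chunk3 y, chunk3 z]).map (fun row => pyFlatten row) = inner3 x y z := by
  induction x, y, z using inner3.induct with
  | case1 a0 b0 c0 t0 a1 b1 c1 t1 a2 b2 c2 t2 ih =>
    rw [show chunk3 (a0 :: b0 :: c0 :: t0) = [a0,b0,c0] :: chunk3 t0 from rfl,
        show chunk3 (a1 :: b1 :: c1 :: t1) = [a1,b1,c1] :: chunk3 t1 from rfl,
        show chunk3 (a2 :: b2 :: c2 :: t2) = [a2,b2,c2] :: chunk3 t2 from rfl,
        pyZip_cons3, List.map_cons, ih,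
        show inner3 (a0 :: b0 :: c0 :: t0) (a1 :: b1 :: c1 :: t1) (a2 :: b2 :: c2 :: t2)
           = [a0, b0, c0, a1, b1, c1, a2, b2, c2] :: inner3 t0 t1 t2 from rfl]
    rfl
  | case2 x y z h =>
    have hlt : x.length < 3 ∨ y.length < 3 ∨ z.length < 3 := by
      by_contra hc
      push Not at hc
      obtain ⟨h1, h2, h3⟩ := hc
      rcases x with _ | ⟨a0, _ | ⟨b0, _ | ⟨c0, t0⟩⟩⟩ <;> try (simp at h1)
      rcases y with _ | ⟨a1, _ | ⟨b1, _ | ⟨c1, t1⟩⟩⟩ <;> try (simp at h2)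
      rcases z with _ | ⟨a2, _ | ⟨b2, _ | ⟨c2, t2⟩⟩⟩ <;> try (simp at h3)
      exact h _ _ _ _ _ _ _ _ _ _ _ _ rfl rfl rfl
    rw [inner3_short x y z hlt]
    have hz : pyZip [chunk3 x, chunk3 y, chunk3 z] = [] := by
      apply pyZip_of_mem_nil
      rcases hlt with hlt | hlt | hlt
      · simp [chunk3_short x hlt]
      · simp [chunk3_short y hlt]
      · simp [chunk3_short z hlt]
    rw [hz]
    rfl

theorem Afold (board : List (List Int)) (acc : List (List Int)) :
    List.foldl
      (fun boxes grouped =>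
        boxes ++ (pyZip (grouped.map (fun row => chunk3 row))).map (fun row => pyFlatten row))
      acc (chunk3 board) = acc ++ boxsSpec board := by
  induction board using boxsSpec.induct generalizing acc with
  | case1 r0 r1 r2 t ih =>
    rw [show chunk3 (r0 :: r1 :: r2 :: t) = [r0, r1, r2] :: chunk3 t from rfl,
        List.foldl_cons, ih,
        show boxsSpec (r0 :: r1 :: r2 :: t) = inner3 r0 r1 r2 ++ boxsSpec t from rfl]
    simp only [List.map_cons, List.map_nil, A_inner, List.append_assoc]
  | case2 b h =>
    have hlt : b.length < 3 := by
      rcases b with _ | ⟨r0, _ | ⟨r1, _ | ⟨r2, t⟩⟩⟩ <;> simp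
      exact (h r0 r1 r2 t rfl).elim
    rw [chunk3_short b hlt, boxsSpec_short b hlt]
    simp

theorem boxs_eq_spec (board : List (List Int)) : boxs board = boxsSpec board := by
  rw [boxs]
  simp only [pyGroup_eq_chunk3]
  exact (Afold board []).trans (by simp)

-- --- B-side reduction ---

theorem B_inner (x y z : List Int) (acc : List (List Int)) :
    (List.zipWith3 (fun (t0 t1 t2 : Int × Int × Int) =>
        [t0.1, t0.2.1, t0.2.2, t1.1, t1.2.1, t1.2.2, t2.1, t2.2.1, t2.2.2])
      (triples x) (triples y) (triples z)).foldl (fun bx box => bx ++ [box]) acc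
    = acc ++ inner3 x y z := by
  induction x, y, z using inner3.induct generalizing acc with
  | case1 a0 b0 c0 t0 a1 b1 c1 t1 a2 b2 c2 t2 ih =>
    rw [show triples (a0 :: b0 :: c0 :: t0) = (a0, b0, c0) :: triples t0 from rfl,
        show triples (a1 :: b1 :: c1 :: t1) = (a1, b1, c1) :: triples t1 from rfl,
        show triples (a2 :: b2 :: c2 :: t2) = (a2, b2, c2) :: triples t2 from rfl,
        List.zipWith3, List.foldl_cons, ih,
        show inner3 (a0 :: b0 :: c0 :: t0) (a1 :: b1 :: c1 :: t1) (a2 :: b2 :: c2 :: t2)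
           = [a0, b0, c0, a1, b1, c1, a2, b2, c2] :: inner3 t0 t1 t2 from rfl]
    simp
  | case2 x y z h =>
    have hlt : x.length < 3 ∨ y.length < 3 ∨ z.length < 3 := by
      by_contra hc
      push Not at hc
      obtain ⟨h1, h2, h3⟩ := hc
      rcases x with _ | ⟨a0, _ | ⟨b0, _ | ⟨c0, t0⟩⟩⟩ <;> try (simp at h1)
      rcases y with _ | ⟨a1, _ | ⟨b1, _ | ⟨c1, t1⟩⟩⟩ <;> try (simp at h2)
      rcases z with _ | ⟨a2, _ | ⟨b2, _ | ⟨c2, t2⟩⟩⟩ <;> try (simp at h3)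
      exact h _ _ _ _ _ _ _ _ _ _ _ _ rfl rfl rfl
    rw [inner3_short x y z hlt]
    have hz : List.zipWith3 (fun (t0 t1 t2 : Int × Int × Int) =>
        [t0.1, t0.2.1, t0.2.2, t1.1, t1.2.1, t1.2.2, t2.1, t2.2.1, t2.2.2])
        (triples x) (triples y) (triples z) = [] := by
      have tshort : ∀ (l : List Int), l.length < 3 → triples l = ([] : List (Int × Int × Int)) := by
        intro l hl
        rcases l with _ | ⟨a, _ | ⟨b, _ | ⟨c, t⟩⟩⟩ <;>
          first | rfl | (exfalso; simp only [List.length_cons] at hl; omega)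
      rcases hlt with hlt | hlt | hlt
      · rw [tshort x hlt]; rfl
      · rw [tshort y hlt]
        cases triples x <;> rfl
      · rw [tshort z hlt]
        cases triples x <;> (try cases triples y) <;> rfl
    rw [hz]
    simp

theorem Bfold (board : List (List Int)) (acc : List (List Int)) :
    (triples board).foldl (fun boxes r =>
      (List.zipWith3 (fun (t0 t1 t2 : Int × Int × Int) =>
          [t0.1, t0.2.1, t0.2.2, t1.1, t1.2.1, t1.2.2, t2.1, t2.2.1, t2.2.2])
        (triples r.1) (triples r.2.1) (triples r.2.2)).foldl
        (fun bx box => bx ++ [box]) boxes) acc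
    = acc ++ boxsSpec board := by
  induction board using boxsSpec.induct generalizing acc with
  | case1 r0 r1 r2 t ih =>
    rw [show triples (r0 :: r1 :: r2 :: t) = (r0, r1, r2) :: triples t from rfl,
        List.foldl_cons]
    show (triples t).foldl _ ((List.zipWith3 _ (triples r0) (triples r1) (triples r2)).foldl _ acc) = _
    rw [B_inner, ih,
        show boxsSpec (r0 :: r1 :: r2 :: t) = inner3 r0 r1 r2 ++ boxsSpec t from rfl,
        List.append_assoc]
  | case2 b h =>
    have hlt : b.length < 3 := by
      rcases b with _ | ⟨r0, _ | ⟨r1, _ | ⟨r2, t⟩⟩⟩ <;> simp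
      exact (h r0 r1 r2 t rfl).elim
    have ht : triples b = ([] : List (List Int × List Int × List Int)) := by
      rcases b with _ | ⟨r0, _ | ⟨r1, _ | ⟨r2, t⟩⟩⟩ <;>
        first | rfl | (exfalso; simp only [List.length_cons] at hlt; omega)
    rw [ht, boxsSpec_short b hlt]
    simp

theorem boxs_alt_eq_spec (board : List (List Int)) : boxs_alt board = boxsSpec board := by
  rw [boxs_alt]
  exact (Bfold board []).trans (List.nil_append _)

-- ===== VERDICT (by name: the statement is the Claim_ definition above) =====
theorem boxs_spec : Claim_equal_boxs := by
  intro board _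
  unfold Spec_boxs
  rw [boxs_eq_spec, boxs_alt_eq_spec]
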